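-- pv_equiv track=rewrite | github.com/stefanoclemente/hypergraph_properties | src/hypergraph_properties/venn_graphlets.py | _regions_signature
-- ===== SOURCE A (Python) =====
-- def _regions_signature(A, B, C):
--     """
--     Compute the 7-bit Venn signature for three sets A, B, C.
--
--     Each bit encodes whether a specific Venn region is non-empty (1) or empty (0).
--     Bit order (least significant bit = region 1):
--
--         bit 0 -> A \ B \ C              (only e1)
--         bit 1 -> B \ C \ A              (only e2)
--         bit 2 -> C \ A \ B              (only e3)
--         bit 3 -> A ∩ B \ C              (e1 and e2 only)
--         bit 4 -> B ∩ C \ A              (e2 and e3 only)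
--         bit 5 -> C ∩ A \ B              (e3 and e1 only)
--         bit 6 -> A ∩ B ∩ C              (triple intersection)
--
--     The signature is therefore an integer in [0, 127] whose binary
--     representation describes the emptiness pattern of the 7 regions.
--     """
--
--     r1 = A - B - C #  The difference operation on sets. The results is 0 iff the difference is the empty set.
--     r2 = B - C - A
--     r3 = C - A - B
--     r4 = (A & B) - C
--     r5 = (B & C) - A
--     r6 = (C & A) - B
--     r7 = A & B & C
--
--     bits = [
--         1 if r1 else 0,
--         1 if r2 else 0,
--         1 if r3 else 0,
--         1 if r4 else 0,
--         1 if r5 else 0,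
--         1 if r6 else 0,
--         1 if r7 else 0,
--     ]
--
--     sig = 0
--     for i, b in enumerate(bits):
--         sig |= (b << i)
--     return sig
-- ===== SOURCE B (Python) =====
-- def _regions_signature(A, B, C):
--     # One pass over the union: classify each element into its Venn region by a
--     # 3-bit membership mask, and OR the corresponding region bit into the signature.
--     region_bit = {1: 0, 2: 1, 4: 2, 3: 3, 6: 4, 5: 5, 7: 6}
--     sig = 0
--     for x in A | B | C:
--         m = (1 if x in A else 0) | (2 if x in B else 0) | (4 if x in C else 0)
--         sig |= 1 << region_bit[m]
--     return sig
-- ===== Notes on version B (the rewrite author's own statement) =====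
-- stated objective: alternative
-- what changed: Instead of materializing the 7 Venn-region sets via repeated set difference/intersection and folding their emptiness bits, B makes one pass over the union, classifies each element by a 3-bit membership mask mapped through a fixed dict to its region bit, and ORs that bit into the signature.
import Mathlib
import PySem

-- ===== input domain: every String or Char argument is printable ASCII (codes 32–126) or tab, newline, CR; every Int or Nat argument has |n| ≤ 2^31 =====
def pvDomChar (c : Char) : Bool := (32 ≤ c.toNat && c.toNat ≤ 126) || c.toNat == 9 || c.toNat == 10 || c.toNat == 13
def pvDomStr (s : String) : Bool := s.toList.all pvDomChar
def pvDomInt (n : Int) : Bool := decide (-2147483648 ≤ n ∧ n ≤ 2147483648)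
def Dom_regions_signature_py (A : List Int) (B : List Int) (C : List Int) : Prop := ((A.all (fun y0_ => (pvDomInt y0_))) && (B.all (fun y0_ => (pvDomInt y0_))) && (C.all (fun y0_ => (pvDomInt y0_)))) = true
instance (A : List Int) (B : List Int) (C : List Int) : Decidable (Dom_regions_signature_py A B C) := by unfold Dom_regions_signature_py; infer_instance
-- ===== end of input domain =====

-- B replaces A's nine intermediate region sets by a single membership-mask pass over
-- the union (alternative decomposition; same asymptotic cost). The OR-accumulation is
-- independent of the (unmodelled) Python set iteration order.

-- ===== PORT A =====
def regions_signature_py (A : List Int) (B : List Int) (C : List Int) : Int :=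
  let r1 := PySem.Set.diff (PySem.Set.diff A B) C
  let r2 := PySem.Set.diff (PySem.Set.diff B C) A
  let r3 := PySem.Set.diff (PySem.Set.diff C A) B
  let r4 := PySem.Set.diff (PySem.Set.inter A B) C
  let r5 := PySem.Set.diff (PySem.Set.inter B C) A
  let r6 := PySem.Set.diff (PySem.Set.inter C A) B
  let r7 := PySem.Set.inter (PySem.Set.inter A B) C
  let bits : List Int :=
    [ if r1 ≠ [] then 1 else 0,
      if r2 ≠ [] then 1 else 0,
      if r3 ≠ [] then 1 else 0,
      if r4 ≠ [] then 1 else 0,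
      if r5 ≠ [] then 1 else 0,
      if r6 ≠ [] then 1 else 0,
      if r7 ≠ [] then 1 else 0 ]
  (PySem.List.enumerate bits).foldl (fun sig ib => PySem.Int.bor sig (ib.2 <<< ib.1.toNat)) 0

-- ===== PORT B =====
-- the dict literal {1:0, 2:1, 4:2, 3:3, 6:4, 5:5, 7:6}
def pvRegionBit : PySem.Dict Int Int := PySem.Dict.ofList [(1,0),(2,1),(4,2),(3,3),(6,4),(5,5),(7,6)]

-- m = (1 if x in A else 0) | (2 if x in B else 0) | (4 if x in C else 0)
def pvMask (A B C : List Int) (x : Int) : Int :=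
  PySem.Int.bor (PySem.Int.bor (if A.contains x then 1 else 0) (if B.contains x then 2 else 0))
    (if C.contains x then 4 else 0)

def regions_signature_py_alt (A : List Int) (B : List Int) (C : List Int) : Int :=
  -- for x in A | B | C: sig |= 1 << region_bit[m]; the KeyError branch of region_bit[m]
  -- is unreachable (every x of the union has mask 1..7), so getD only totalizes it
  (PySem.Set.union (PySem.Set.union A B) C).foldl
    (fun sig x => PySem.Int.bor sig ((1:Int) <<< (PySem.Dict.getD pvRegionBit (pvMask A B C x) 0).toNat)) 0

-- ===== PRECONDITION & SPEC =====
def Spec_regions_signature_py (A : List Int) (B : List Int) (C : List Int) (out : Int) : Prop := out = regions_signature_py_alt A B C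
instance (A : List Int) (B : List Int) (C : List Int) (out : Int) : Decidable (Spec_regions_signature_py A B C out) := by unfold Spec_regions_signature_py; infer_instance

-- ===== CLAIM (what is proved, stated in full; the proofs are below) =====
def Claim_equal_regions_signature_py : Prop := ∀ (A : List Int) (B : List Int) (C : List Int), Dom_regions_signature_py A B C → Spec_regions_signature_py A B C (regions_signature_py A B C)

-- ===== LEMMAS AND PROOFS =====

-- value of a 7-bit signature given the seven region-nonemptiness booleans
def pvVal (b0 b1 b2 b3 b4 b5 b6 : Bool) : Int :=
  (if b0 then 1 else 0) + (if b1 then 2 else 0) + (if b2 then 4 else 0) +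
  (if b3 then 8 else 0) + (if b4 then 16 else 0) + (if b5 then 32 else 0) +
  (if b6 then 64 else 0)

def pvBit (A B C : List Int) (x : Int) : Int := PySem.Dict.getD pvRegionBit (pvMask A B C x) 0

lemma pvBit_spec (A B C : List Int) (x : Int) :
    pvBit A B C x =
      (if x ∈ A then (if x ∈ B then (if x ∈ C then 6 else 3) else (if x ∈ C then 5 else 0))
       else (if x ∈ B then (if x ∈ C then 4 else 1) else (if x ∈ C then 2 else 0))) := by
  unfold pvBit pvMask
  by_cases hA : x ∈ A <;> by_cases hB : x ∈ B <;> by_cases hC : x ∈ C <;>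
    simp [hA, hB, hC] <;> decide

lemma pv_enum_or (c1 c2 c3 c4 c5 c6 c7 : Bool) :
    (PySem.List.enumerate
      [ (if c1 then (1:Int) else 0), (if c2 then 1 else 0), (if c3 then 1 else 0),
        (if c4 then 1 else 0), (if c5 then 1 else 0), (if c6 then 1 else 0),
        (if c7 then 1 else 0) ]).foldl
      (fun sig ib => PySem.Int.bor sig (ib.2 <<< ib.1.toNat)) 0
    = pvVal c1 c2 c3 c4 c5 c6 c7 := by
  cases c1 <;> cases c2 <;> cases c3 <;> cases c4 <;> cases c5 <;> cases c6 <;> cases c7 <;> decide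

lemma pv_or0 : ∀ b0 b1 b2 b3 b4 b5 b6 : Bool,
    PySem.Int.bor (pvVal b0 b1 b2 b3 b4 b5 b6) ((1:Int) <<< (Int.toNat 0)) = pvVal true b1 b2 b3 b4 b5 b6 := by decide
lemma pv_or1 : ∀ b0 b1 b2 b3 b4 b5 b6 : Bool,
    PySem.Int.bor (pvVal b0 b1 b2 b3 b4 b5 b6) ((1:Int) <<< (Int.toNat 1)) = pvVal b0 true b2 b3 b4 b5 b6 := by decide
lemma pv_or2 : ∀ b0 b1 b2 b3 b4 b5 b6 : Bool,
    PySem.Int.bor (pvVal b0 b1 b2 b3 b4 b5 b6) ((1:Int) <<< (Int.toNat 2)) = pvVal b0 b1 true b3 b4 b5 b6 := by decide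
lemma pv_or3 : ∀ b0 b1 b2 b3 b4 b5 b6 : Bool,
    PySem.Int.bor (pvVal b0 b1 b2 b3 b4 b5 b6) ((1:Int) <<< (Int.toNat 3)) = pvVal b0 b1 b2 true b4 b5 b6 := by decide
lemma pv_or4 : ∀ b0 b1 b2 b3 b4 b5 b6 : Bool,
    PySem.Int.bor (pvVal b0 b1 b2 b3 b4 b5 b6) ((1:Int) <<< (Int.toNat 4)) = pvVal b0 b1 b2 b3 true b5 b6 := by decide
lemma pv_or5 : ∀ b0 b1 b2 b3 b4 b5 b6 : Bool,
    PySem.Int.bor (pvVal b0 b1 b2 b3 b4 b5 b6) ((1:Int) <<< (Int.toNat 5)) = pvVal b0 b1 b2 b3 b4 true b6 := by decide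
lemma pv_or6 : ∀ b0 b1 b2 b3 b4 b5 b6 : Bool,
    PySem.Int.bor (pvVal b0 b1 b2 b3 b4 b5 b6) ((1:Int) <<< (Int.toNat 6)) = pvVal b0 b1 b2 b3 b4 b5 true := by decide

lemma pv_fold_val (A B C : List Int) :
    ∀ (U : List Int), (∀ x ∈ U, x ∈ A ∨ x ∈ B ∨ x ∈ C) →
    ∀ b0 b1 b2 b3 b4 b5 b6 : Bool,
      U.foldl (fun sig x => PySem.Int.bor sig ((1:Int) <<< (pvBit A B C x).toNat))
        (pvVal b0 b1 b2 b3 b4 b5 b6)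
      = pvVal (b0 || U.any (fun x => pvBit A B C x == 0))
              (b1 || U.any (fun x => pvBit A B C x == 1))
              (b2 || U.any (fun x => pvBit A B C x == 2))
              (b3 || U.any (fun x => pvBit A B C x == 3))
              (b4 || U.any (fun x => pvBit A B C x == 4))
              (b5 || U.any (fun x => pvBit A B C x == 5))
              (b6 || U.any (fun x => pvBit A B C x == 6)) := by
  intro U
  induction U with
  | nil => intro _ b0 b1 b2 b3 b4 b5 b6; simp
  | cons x xs ih =>
    intro hU b0 b1 b2 b3 b4 b5 b6
    have hx : x ∈ A ∨ x ∈ B ∨ x ∈ C := hU x (by simp)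
    have h7 : pvBit A B C x = 0 ∨ pvBit A B C x = 1 ∨ pvBit A B C x = 2 ∨
        pvBit A B C x = 3 ∨ pvBit A B C x = 4 ∨ pvBit A B C x = 5 ∨ pvBit A B C x = 6 := by
      rw [pvBit_spec]; split_ifs <;> simp
    have hU' : ∀ y ∈ xs, y ∈ A ∨ y ∈ B ∨ y ∈ C := fun y hy => hU y (by simp [hy])
    simp only [List.foldl_cons]
    rcases h7 with h | h | h | h | h | h | h <;> rw [h] <;>
      first
      | (rw [pv_or0, ih hU']; simp [h])
      | (rw [pv_or1, ih hU']; simp [h])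
      | (rw [pv_or2, ih hU']; simp [h])
      | (rw [pv_or3, ih hU']; simp [h])
      | (rw [pv_or4, ih hU']; simp [h])
      | (rw [pv_or5, ih hU']; simp [h])
      | (rw [pv_or6, ih hU']; simp [h])


lemma pv_mem_U (A B C : List Int) (x : Int) :
    x ∈ PySem.Set.union (PySem.Set.union A B) C ↔ x ∈ A ∨ x ∈ B ∨ x ∈ C := by
  simp [PySem.Set.mem_union, or_assoc]

lemma pv_slot (A B C : List Int) (j : Int) (R : List Int)
    (hmem : ∀ x, x ∈ R ↔ (x ∈ A ∨ x ∈ B ∨ x ∈ C) ∧ pvBit A B C x = j) :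
    decide (R ≠ []) = ((PySem.Set.union (PySem.Set.union A B) C).any fun x => pvBit A B C x == j) := by
  rw [Bool.eq_iff_iff]
  simp only [decide_eq_true_eq, List.any_eq_true, beq_iff_eq, ne_eq, pv_mem_U]
  constructor
  · intro hne
    obtain ⟨x, hxR⟩ := List.exists_mem_of_ne_nil _ hne
    rcases (hmem x).1 hxR with ⟨h1, h2⟩
    exact ⟨x, h1, h2⟩
  · rintro ⟨x, h1, h2⟩
    exact List.ne_nil_of_mem ((hmem x).2 ⟨h1, h2⟩)

lemma pv_bit0_iff (A B C : List Int) (x : Int) (hx : x ∈ A ∨ x ∈ B ∨ x ∈ C) :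
    pvBit A B C x = 0 ↔ x ∈ A ∧ x ∉ B ∧ x ∉ C := by
  rw [pvBit_spec]
  by_cases hA : x ∈ A <;> by_cases hB : x ∈ B <;> by_cases hC : x ∈ C <;>
    simp [hA, hB, hC] at hx ⊢

lemma pv_bit1_iff (A B C : List Int) (x : Int) (hx : x ∈ A ∨ x ∈ B ∨ x ∈ C) :
    pvBit A B C x = 1 ↔ x ∈ B ∧ x ∉ C ∧ x ∉ A := by
  rw [pvBit_spec]
  by_cases hA : x ∈ A <;> by_cases hB : x ∈ B <;> by_cases hC : x ∈ C <;>
    simp [hA, hB, hC] at hx ⊢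

lemma pv_bit2_iff (A B C : List Int) (x : Int) (hx : x ∈ A ∨ x ∈ B ∨ x ∈ C) :
    pvBit A B C x = 2 ↔ x ∈ C ∧ x ∉ A ∧ x ∉ B := by
  rw [pvBit_spec]
  by_cases hA : x ∈ A <;> by_cases hB : x ∈ B <;> by_cases hC : x ∈ C <;>
    simp [hA, hB, hC] at hx ⊢

lemma pv_bit3_iff (A B C : List Int) (x : Int) (hx : x ∈ A ∨ x ∈ B ∨ x ∈ C) :
    pvBit A B C x = 3 ↔ x ∈ A ∧ x ∈ B ∧ x ∉ C := by
  rw [pvBit_spec]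
  by_cases hA : x ∈ A <;> by_cases hB : x ∈ B <;> by_cases hC : x ∈ C <;>
    simp [hA, hB, hC] at hx ⊢

lemma pv_bit4_iff (A B C : List Int) (x : Int) (hx : x ∈ A ∨ x ∈ B ∨ x ∈ C) :
    pvBit A B C x = 4 ↔ x ∈ B ∧ x ∈ C ∧ x ∉ A := by
  rw [pvBit_spec]
  by_cases hA : x ∈ A <;> by_cases hB : x ∈ B <;> by_cases hC : x ∈ C <;>
    simp [hA, hB, hC] at hx ⊢

lemma pv_bit5_iff (A B C : List Int) (x : Int) (hx : x ∈ A ∨ x ∈ B ∨ x ∈ C) :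
    pvBit A B C x = 5 ↔ x ∈ C ∧ x ∈ A ∧ x ∉ B := by
  rw [pvBit_spec]
  by_cases hA : x ∈ A <;> by_cases hB : x ∈ B <;> by_cases hC : x ∈ C <;>
    simp [hA, hB, hC] at hx ⊢

lemma pv_bit6_iff (A B C : List Int) (x : Int) (hx : x ∈ A ∨ x ∈ B ∨ x ∈ C) :
    pvBit A B C x = 6 ↔ x ∈ A ∧ x ∈ B ∧ x ∈ C := by
  rw [pvBit_spec]
  by_cases hA : x ∈ A <;> by_cases hB : x ∈ B <;> by_cases hC : x ∈ C <;>
    simp [hA, hB, hC] at hx ⊢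

-- ===== VERDICT (by name: the statement is the Claim_ definition above) =====
theorem regions_signature_py_spec : Claim_equal_regions_signature_py := by
  intro A B C _
  unfold Spec_regions_signature_py
  have hU : ∀ x ∈ PySem.Set.union (PySem.Set.union A B) C, x ∈ A ∨ x ∈ B ∨ x ∈ C :=
    fun x hx => (pv_mem_U A B C x).1 hx
  have hBside : regions_signature_py_alt A B C =
      pvVal ((PySem.Set.union (PySem.Set.union A B) C).any fun x => pvBit A B C x == 0)
            ((PySem.Set.union (PySem.Set.union A B) C).any fun x => pvBit A B C x == 1)
            ((PySem.Set.union (PySem.Set.union A B) C).any fun x => pvBit A B C x == 2)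
            ((PySem.Set.union (PySem.Set.union A B) C).any fun x => pvBit A B C x == 3)
            ((PySem.Set.union (PySem.Set.union A B) C).any fun x => pvBit A B C x == 4)
            ((PySem.Set.union (PySem.Set.union A B) C).any fun x => pvBit A B C x == 5)
            ((PySem.Set.union (PySem.Set.union A B) C).any fun x => pvBit A B C x == 6) := by
    have h := pv_fold_val A B C (PySem.Set.union (PySem.Set.union A B) C) hU
      false false false false false false false
    simp only [Bool.false_or] at h
    unfold regions_signature_py_alt
    rw [show (0 : Int) = pvVal false false false false false false false from by decide]
    simpa [pvBit] using h
  have hAside : regions_signature_py A B C =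
      pvVal (decide (PySem.Set.diff (PySem.Set.diff A B) C ≠ []))
            (decide (PySem.Set.diff (PySem.Set.diff B C) A ≠ []))
            (decide (PySem.Set.diff (PySem.Set.diff C A) B ≠ []))
            (decide (PySem.Set.diff (PySem.Set.inter A B) C ≠ []))
            (decide (PySem.Set.diff (PySem.Set.inter B C) A ≠ []))
            (decide (PySem.Set.diff (PySem.Set.inter C A) B ≠ []))
            (decide (PySem.Set.inter (PySem.Set.inter A B) C ≠ [])) := by
    unfold regions_signature_py
    have h := pv_enum_or (decide (PySem.Set.diff (PySem.Set.diff A B) C ≠ []))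
      (decide (PySem.Set.diff (PySem.Set.diff B C) A ≠ []))
      (decide (PySem.Set.diff (PySem.Set.diff C A) B ≠ []))
      (decide (PySem.Set.diff (PySem.Set.inter A B) C ≠ []))
      (decide (PySem.Set.diff (PySem.Set.inter B C) A ≠ []))
      (decide (PySem.Set.diff (PySem.Set.inter C A) B ≠ []))
      (decide (PySem.Set.inter (PySem.Set.inter A B) C ≠ []))
    simpa using h
  rw [hAside, hBside]
  have e0 : ∀ x : Int, x ∈ PySem.Set.diff (PySem.Set.diff A B) C ↔
      (x ∈ A ∨ x ∈ B ∨ x ∈ C) ∧ pvBit A B C x = 0 := by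
    intro x
    rw [PySem.Set.mem_diff, PySem.Set.mem_diff]
    constructor
    · rintro ⟨⟨h1, h2⟩, h3⟩
      exact ⟨Or.inl h1, (pv_bit0_iff A B C x (Or.inl h1)).2 ⟨h1, h2, h3⟩⟩
    · rintro ⟨hx, hb⟩
      rcases (pv_bit0_iff A B C x hx).1 hb with ⟨h1, h2, h3⟩
      exact ⟨⟨h1, h2⟩, h3⟩
  have e1 : ∀ x : Int, x ∈ PySem.Set.diff (PySem.Set.diff B C) A ↔
      (x ∈ A ∨ x ∈ B ∨ x ∈ C) ∧ pvBit A B C x = 1 := by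
    intro x
    rw [PySem.Set.mem_diff, PySem.Set.mem_diff]
    constructor
    · rintro ⟨⟨h1, h2⟩, h3⟩
      exact ⟨Or.inr (Or.inl h1), (pv_bit1_iff A B C x (Or.inr (Or.inl h1))).2 ⟨h1, h2, h3⟩⟩
    · rintro ⟨hx, hb⟩
      rcases (pv_bit1_iff A B C x hx).1 hb with ⟨h1, h2, h3⟩
      exact ⟨⟨h1, h2⟩, h3⟩
  have e2 : ∀ x : Int, x ∈ PySem.Set.diff (PySem.Set.diff C A) B ↔
      (x ∈ A ∨ x ∈ B ∨ x ∈ C) ∧ pvBit A B C x = 2 := by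
    intro x
    rw [PySem.Set.mem_diff, PySem.Set.mem_diff]
    constructor
    · rintro ⟨⟨h1, h2⟩, h3⟩
      exact ⟨Or.inr (Or.inr h1), (pv_bit2_iff A B C x (Or.inr (Or.inr h1))).2 ⟨h1, h2, h3⟩⟩
    · rintro ⟨hx, hb⟩
      rcases (pv_bit2_iff A B C x hx).1 hb with ⟨h1, h2, h3⟩
      exact ⟨⟨h1, h2⟩, h3⟩
  have e3 : ∀ x : Int, x ∈ PySem.Set.diff (PySem.Set.inter A B) C ↔
      (x ∈ A ∨ x ∈ B ∨ x ∈ C) ∧ pvBit A B C x = 3 := by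
    intro x
    rw [PySem.Set.mem_diff, PySem.Set.mem_inter]
    constructor
    · rintro ⟨⟨h1, h2⟩, h3⟩
      exact ⟨Or.inl h1, (pv_bit3_iff A B C x (Or.inl h1)).2 ⟨h1, h2, h3⟩⟩
    · rintro ⟨hx, hb⟩
      rcases (pv_bit3_iff A B C x hx).1 hb with ⟨h1, h2, h3⟩
      exact ⟨⟨h1, h2⟩, h3⟩
  have e4 : ∀ x : Int, x ∈ PySem.Set.diff (PySem.Set.inter B C) A ↔
      (x ∈ A ∨ x ∈ B ∨ x ∈ C) ∧ pvBit A B C x = 4 := by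
    intro x
    rw [PySem.Set.mem_diff, PySem.Set.mem_inter]
    constructor
    · rintro ⟨⟨h1, h2⟩, h3⟩
      exact ⟨Or.inr (Or.inl h1), (pv_bit4_iff A B C x (Or.inr (Or.inl h1))).2 ⟨h1, h2, h3⟩⟩
    · rintro ⟨hx, hb⟩
      rcases (pv_bit4_iff A B C x hx).1 hb with ⟨h1, h2, h3⟩
      exact ⟨⟨h1, h2⟩, h3⟩
  have e5 : ∀ x : Int, x ∈ PySem.Set.diff (PySem.Set.inter C A) B ↔
      (x ∈ A ∨ x ∈ B ∨ x ∈ C) ∧ pvBit A B C x = 5 := by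
    intro x
    rw [PySem.Set.mem_diff, PySem.Set.mem_inter]
    constructor
    · rintro ⟨⟨h1, h2⟩, h3⟩
      exact ⟨Or.inr (Or.inr h1), (pv_bit5_iff A B C x (Or.inr (Or.inr h1))).2 ⟨h1, h2, h3⟩⟩
    · rintro ⟨hx, hb⟩
      rcases (pv_bit5_iff A B C x hx).1 hb with ⟨h1, h2, h3⟩
      exact ⟨⟨h1, h2⟩, h3⟩
  have e6 : ∀ x : Int, x ∈ PySem.Set.inter (PySem.Set.inter A B) C ↔
      (x ∈ A ∨ x ∈ B ∨ x ∈ C) ∧ pvBit A B C x = 6 := by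
    intro x
    rw [PySem.Set.mem_inter, PySem.Set.mem_inter]
    constructor
    · rintro ⟨⟨h1, h2⟩, h3⟩
      exact ⟨Or.inl h1, (pv_bit6_iff A B C x (Or.inl h1)).2 ⟨h1, h2, h3⟩⟩
    · rintro ⟨hx, hb⟩
      rcases (pv_bit6_iff A B C x hx).1 hb with ⟨h1, h2, h3⟩
      exact ⟨⟨h1, h2⟩, h3⟩
  rw [pv_slot A B C 0 _ e0, pv_slot A B C 1 _ e1, pv_slot A B C 2 _ e2,
      pv_slot A B C 3 _ e3, pv_slot A B C 4 _ e4, pv_slot A B C 5 _ e5,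
      pv_slot A B C 6 _ e6]
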